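-- pv_equiv track=rewrite | github.com/ducklin404/chess_engine | engine/bitboard_utils.py | bishop_mask
-- ===== SOURCE A (Python) =====
-- def bishop_mask(sq: int) -> int:
--     r, f = divmod(sq, 8)
--     mask = 0
--     for dr, df in ((1, 1), (1, -1), (-1, 1), (-1, -1)):
--         r_, f_ = r + dr, f + df
--         while 0 < r_ < 7 and 0 < f_ < 7:
--             mask |= 1 << (r_ * 8 + f_)
--             r_, f_ = r_ + dr, f_ + df
--     return mask
-- ===== SOURCE B (Python) =====
-- def bishop_mask(sq: int) -> int:
--     r, f = divmod(sq, 8)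
--     frontier = [(r + dr, f + df, dr, df)
--                 for dr, df in ((1, 1), (1, -1), (-1, 1), (-1, -1))]
--     mask = 0
--     while frontier:
--         nxt = []
--         for r2, f2, dr, df in frontier:
--             if 0 < r2 < 7 and 0 < f2 < 7:
--                 mask |= 1 << (r2 * 8 + f2)
--                 nxt.append((r2 + dr, f2 + df, dr, df))
--         frontier = nxt
--     return mask
-- ===== Notes on version B (the rewrite author's own statement) =====
-- stated objective: alternative
-- what changed: Replaces the four sequential outward ray walks by a single frontier/worklist loop that advances all four diagonal directions in lock-step (breadth-first by distance), collecting bits as the frontier expands until it empties.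
import Mathlib
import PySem

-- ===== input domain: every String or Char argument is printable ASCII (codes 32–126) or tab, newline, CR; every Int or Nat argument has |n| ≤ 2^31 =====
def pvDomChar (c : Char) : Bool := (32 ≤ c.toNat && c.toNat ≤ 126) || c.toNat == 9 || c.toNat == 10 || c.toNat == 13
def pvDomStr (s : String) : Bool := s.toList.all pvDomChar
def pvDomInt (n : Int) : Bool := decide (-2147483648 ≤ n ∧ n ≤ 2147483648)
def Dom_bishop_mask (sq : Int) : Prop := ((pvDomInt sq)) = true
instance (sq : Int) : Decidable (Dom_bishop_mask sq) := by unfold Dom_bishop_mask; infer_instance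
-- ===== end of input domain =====

-- B replaces A's four sequential ray walks by one frontier loop advancing all four diagonal directions in lock-step; same value everywhere.

-- ===== PORT A =====
-- the while loop of one ray; fuel 8 exceeds the at most 6 iterations the loop condition (1 ≤ r_ ≤ 6, r_ moving monotonically by ±1) allows
def pvRay (fuel : Nat) (dr df r_ f_ mask : Int) : Int :=
  match fuel with
  | 0 => mask
  | fuel+1 =>
    if 0 < r_ ∧ r_ < 7 ∧ 0 < f_ ∧ f_ < 7 then
      pvRay fuel dr df (r_ + dr) (f_ + df) (PySem.Int.bor mask ((1:Int) <<< (r_ * 8 + f_).toNat))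
    else mask

def bishop_mask (sq : Int) : Int :=
  let r := PySem.Int.floordiv sq 8
  let f := PySem.Int.mod sq 8
  [((1:Int), (1:Int)), (1, -1), (-1, 1), (-1, -1)].foldl
    (fun mask d => pvRay 8 d.1 d.2 (r + d.1) (f + d.2) mask) 0

-- ===== PORT B =====
-- the while loop over the frontier; each round shrinks or keeps the frontier and it is
-- empty after at most 7 rounds (a ray has at most 6 interior squares), so fuel 8 suffices
-- the body of the inner for-loop: examine one frontier square, extend nxt and mask
def pvStep (st : List (Int × Int × Int × Int) × Int) (q : Int × Int × Int × Int) :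
    List (Int × Int × Int × Int) × Int :=
  if 0 < q.1 ∧ q.1 < 7 ∧ 0 < q.2.1 ∧ q.2.1 < 7 then
    (st.1 ++ [(q.1 + q.2.2.1, q.2.1 + q.2.2.2, q.2.2.1, q.2.2.2)],
     PySem.Int.bor st.2 ((1:Int) <<< (q.1 * 8 + q.2.1).toNat))
  else st

def pvRounds (fuel : Nat) (frontier : List (Int × Int × Int × Int)) (mask : Int) : Int :=
  match fuel with
  | 0 => mask
  | fuel+1 =>
    if frontier = [] then mask
    else
      let st := frontier.foldl pvStep ([], mask)
      pvRounds fuel st.1 st.2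

def bishop_mask_alt (sq : Int) : Int :=
  let r := PySem.Int.floordiv sq 8
  let f := PySem.Int.mod sq 8
  let frontier := [((1:Int), (1:Int)), (1, -1), (-1, 1), (-1, -1)].map
    (fun d => (r + d.1, f + d.2, d.1, d.2))
  pvRounds 8 frontier 0

-- ===== PRECONDITION & SPEC =====
def Spec_bishop_mask (sq : Int) (out : Int) : Prop := out = bishop_mask_alt sq
instance (sq : Int) (out : Int) : Decidable (Spec_bishop_mask sq out) := by unfold Spec_bishop_mask; infer_instance

-- ===== CLAIM (what is proved, stated in full; the proofs are below) =====
def Claim_equal_bishop_mask : Prop := ∀ (sq : Int), Dom_bishop_mask sq → Spec_bishop_mask sq (bishop_mask sq)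

-- ===== LEMMAS AND PROOFS =====

-- a ray whose first square is already outside the interior contributes nothing
theorem pvRay_stop (fuel : Nat) (dr df r_ f_ mask : Int)
    (h : ¬ (0 < r_ ∧ r_ < 7 ∧ 0 < f_ ∧ f_ < 7)) : pvRay fuel dr df r_ f_ mask = mask := by
  cases fuel with
  | zero => rfl
  | succ n => simp [pvRay, h]

theorem floordiv_eight (sq : Int) : PySem.Int.floordiv sq 8 = sq / 8 :=
  PySem.Int.floordiv_eq_ediv_of_pos (by omega)

theorem out_of_range_A (sq : Int) (h : sq < 0 ∨ 64 ≤ sq) : bishop_mask sq = 0 := by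
  have hr : PySem.Int.floordiv sq 8 < 0 ∨ 8 ≤ PySem.Int.floordiv sq 8 := by
    rw [floordiv_eight]; omega
  simp only [bishop_mask, List.foldl]
  rw [pvRay_stop 8 _ _ _ _ _ (by omega), pvRay_stop 8 _ _ _ _ _ (by omega),
      pvRay_stop 8 _ _ _ _ _ (by omega), pvRay_stop 8 _ _ _ _ _ (by omega)]

theorem pvRounds_nil (fuel : Nat) (mask : Int) : pvRounds fuel [] mask = mask := by
  cases fuel <;> simp [pvRounds]

theorem foldl_dead (l : List (Int × Int × Int × Int)) (st : List (Int × Int × Int × Int) × Int)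
    (h : ∀ q ∈ l, ¬ (0 < q.1 ∧ q.1 < 7 ∧ 0 < q.2.1 ∧ q.2.1 < 7)) :
    l.foldl pvStep st = st := by
  induction l generalizing st with
  | nil => rfl
  | cons q l ih =>
    have hq := h q (by simp)
    simp only [List.foldl, pvStep, if_neg hq]
    exact ih st (fun p hp => h p (by simp [hp]))

theorem pvRounds_dead (fuel : Nat) (frontier : List (Int × Int × Int × Int)) (mask : Int)
    (h : ∀ q ∈ frontier, ¬ (0 < q.1 ∧ q.1 < 7 ∧ 0 < q.2.1 ∧ q.2.1 < 7)) :
    pvRounds fuel frontier mask = mask := by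
  cases fuel with
  | zero => rfl
  | succ n =>
    by_cases he : frontier = []
    · simp [pvRounds, he]
    · simp only [pvRounds, if_neg he, foldl_dead frontier ([], mask) h]
      exact pvRounds_nil n mask

theorem out_of_range_B (sq : Int) (h : sq < 0 ∨ 64 ≤ sq) : bishop_mask_alt sq = 0 := by
  have hr : PySem.Int.floordiv sq 8 < 0 ∨ 8 ≤ PySem.Int.floordiv sq 8 := by
    rw [floordiv_eight]; omega
  refine pvRounds_dead 8 _ 0 ?_
  intro q hq
  simp only [List.map, List.mem_cons, List.not_mem_nil, or_false] at hq
  rcases hq with rfl | rfl | rfl | rfl <;> simp only [] <;> omega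

theorem in_range_eq (sq : Int) (h0 : 0 ≤ sq) (h1 : sq < 64) :
    bishop_mask sq = bishop_mask_alt sq := by
  interval_cases sq <;> decide

-- ===== VERDICT (by name: the statement is the Claim_ definition above) =====
theorem bishop_mask_spec : Claim_equal_bishop_mask := by
  intro sq _
  unfold Spec_bishop_mask
  by_cases h : 0 ≤ sq ∧ sq < 64
  · exact in_range_eq sq h.1 h.2
  · rw [out_of_range_A sq (by omega), out_of_range_B sq (by omega)]
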